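-- pv_equiv track=rewrite | github.com/pypi-data/pypi-mirror-275 | packages/number2text/number2text-0.0.1.tar.gz/number2text-0.0.1/number2text/lang/id.py | convert_less_than_thousand
-- ===== SOURCE A (Python) =====
-- _ones= ["", "satu", "dua", "tiga", "empat", "lima", "enam", "tujuh", "delapan", "sembilan"]
--
-- _teens = ["sepuluh", "sebelas", "dua belas", "tiga belas", "empat belas", "lima belas", "enam belas", "tujuh belas", "delapan belas", "sembilan belas"]
--
-- _tens = ["", "", "dua puluh", "tiga puluh", "empat puluh", "lima puluh", "enam puluh", "tujuh puluh", "delapan puluh", "sembilan puluh"]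
--
-- _hundreds = ["", "seratus", "dua ratus", "tiga ratus", "empat ratus", "lima ratus", "enam ratus", "tujuh ratus", "delapan ratus", "sembilan ratus"]
--
-- def convert_less_than_thousand(number):
--     if number < 10:
--         return _ones[number]
--     elif number < 20:
--         return _teens[number - 10]
--     elif number < 100:
--         tens, ones = divmod(number, 10)
--         if ones == 0:
--             return _tens[tens]
--         else:
--             return _tens[tens] + " " + _ones[ones]
--     else:
--         hundreds, less_than_hundred = divmod(number, 100)
--         if less_than_hundred == 0:
--             return _hundreds[hundreds]
--         else:
--             return _hundreds[hundreds] + " " + convert_less_than_thousand(less_than_hundred)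
-- ===== SOURCE B (Python) =====
-- _ones= ["", "satu", "dua", "tiga", "empat", "lima", "enam", "tujuh", "delapan", "sembilan"]
--
--
-- def convert_less_than_thousand(number):
--     # Compositional: Indonesian names above 9 are built from the ones words by
--     # morphological rules ("se-" for a leading 1, suffixes "belas"/"puluh"/"ratus"),
--     # so only the _ones table is needed.
--     if number < 10:
--         return _ones[number]
--     words = []
--     h, r = divmod(number, 100)
--     if h:
--         words.append("seratus" if h == 1 else _ones[h] + " ratus")
--     if 10 <= r < 20:
--         if r == 10:
--             words.append("sepuluh")
--         elif r == 11:
--             words.append("sebelas")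
--         else:
--             words.append(_ones[r - 10] + " belas")
--     else:
--         t, o = divmod(r, 10)
--         if t:
--             words.append(_ones[t] + " puluh")
--         if o:
--             words.append(_ones[o])
--     return " ".join(words)
-- ===== Notes on version B (the rewrite author's own statement) =====
-- stated objective: alternative
-- what changed: B discards A's _teens/_tens/_hundreds lookup tables and recursion and instead synthesizes every word compositionally from the _ones table via Indonesian morphological rules ('se-' for a leading 1, suffixes 'belas'/'puluh'/'ratus'), collecting parts in a list joined once.
import Mathlib
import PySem

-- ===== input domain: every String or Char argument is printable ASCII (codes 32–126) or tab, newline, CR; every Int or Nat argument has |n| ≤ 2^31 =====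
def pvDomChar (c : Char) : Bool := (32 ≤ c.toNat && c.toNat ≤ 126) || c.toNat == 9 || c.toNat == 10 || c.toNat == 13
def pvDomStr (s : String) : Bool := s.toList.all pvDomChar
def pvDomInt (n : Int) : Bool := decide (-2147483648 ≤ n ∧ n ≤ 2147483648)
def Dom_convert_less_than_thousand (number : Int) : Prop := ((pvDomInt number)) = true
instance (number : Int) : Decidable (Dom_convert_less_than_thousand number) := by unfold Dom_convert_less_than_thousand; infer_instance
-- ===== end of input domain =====

-- B is compositional: it keeps only the ones table and builds teens/tens/hundreds words by morphological rules ("se-", "belas", "puluh", "ratus") instead of A's four lookup tables with recursion (objective: alternative).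


def pvOnes : List String := ["", "satu", "dua", "tiga", "empat", "lima", "enam", "tujuh", "delapan", "sembilan"]
def pvTeens : List String := ["sepuluh", "sebelas", "dua belas", "tiga belas", "empat belas", "lima belas", "enam belas", "tujuh belas", "delapan belas", "sembilan belas"]
def pvTens : List String := ["", "", "dua puluh", "tiga puluh", "empat puluh", "lima puluh", "enam puluh", "tujuh puluh", "delapan puluh", "sembilan puluh"]
def pvHundreds : List String := ["", "seratus", "dua ratus", "tiga ratus", "empat ratus", "lima ratus", "enam ratus", "tujuh ratus", "delapan ratus", "sembilan ratus"]

-- ===== PORT A =====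
-- literal transliteration of A; indexing via pyGet? (none = IndexError, excluded by Pre_)
def convert_less_than_thousand (number : Int) : String :=
  if number < 10 then
    (PySem.List.pyGet? pvOnes number).getD ""
  else if number < 20 then
    (PySem.List.pyGet? pvTeens (number - 10)).getD ""
  else if number < 100 then
    let tens := PySem.Int.floordiv number 10
    let ones := PySem.Int.mod number 10
    if ones = 0 then (PySem.List.pyGet? pvTens tens).getD ""
    else (PySem.List.pyGet? pvTens tens).getD "" ++ " " ++ (PySem.List.pyGet? pvOnes ones).getD ""
  else
    let hundreds := PySem.Int.floordiv number 100
    let less_than_hundred := PySem.Int.mod number 100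
    if less_than_hundred = 0 then (PySem.List.pyGet? pvHundreds hundreds).getD ""
    else (PySem.List.pyGet? pvHundreds hundreds).getD "" ++ " " ++ convert_less_than_thousand less_than_hundred
termination_by number.toNat
decreasing_by
  have h2 : 0 ≤ PySem.Int.mod number 100 := PySem.Int.mod_nonneg number (by omega : (0:Int) < 100)
  have h3 : PySem.Int.mod number 100 < 100 := PySem.Int.mod_lt number (by omega)
  omega

-- ===== PORT B =====
-- transliteration of Source B: compositional morphological rules from the ones table only; no teens/tens/hundreds tables, no recursion
def convert_less_than_thousand_alt (number : Int) : String :=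
  if number < 10 then
    (PySem.List.pyGet? pvOnes number).getD ""
  else
    let h := PySem.Int.floordiv number 100
    let r := PySem.Int.mod number 100
    let words : List String :=
      if h ≠ 0 then
        [if h = 1 then "seratus" else (PySem.List.pyGet? pvOnes h).getD "" ++ " ratus"]
      else []
    let words :=
      if 10 ≤ r ∧ r < 20 then
        words ++ [if r = 10 then "sepuluh"
                  else if r = 11 then "sebelas"
                  else (PySem.List.pyGet? pvOnes (r - 10)).getD "" ++ " belas"]
      else
        let t := PySem.Int.floordiv r 10
        let o := PySem.Int.mod r 10
        (words ++ (if t ≠ 0 then [(PySem.List.pyGet? pvOnes t).getD "" ++ " puluh"] else []))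
          ++ (if o ≠ 0 then [(PySem.List.pyGet? pvOnes o).getD ""] else [])
    PySem.Str.join " " words

-- ===== PRECONDITION & SPEC =====
-- Pre_: exactly the inputs where A returns; A raises IndexError for number < -10 (ones[number]) and number ≥ 1000 (hundreds index ≥ 10)
def Pre_convert_less_than_thousand (number : Int) : Prop := -10 ≤ number ∧ number < 1000
instance (number : Int) : Decidable (Pre_convert_less_than_thousand number) := by unfold Pre_convert_less_than_thousand; infer_instance
def pvWitness_convert_less_than_thousand : Int := 123

def Spec_convert_less_than_thousand (number : Int) (out : String) : Prop := out = convert_less_than_thousand_alt number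
instance (number : Int) (out : String) : Decidable (Spec_convert_less_than_thousand number out) := by unfold Spec_convert_less_than_thousand; infer_instance

-- ===== CLAIM =====
def Claim_equal_convert_less_than_thousand : Prop := ∀ (number : Int), Dom_convert_less_than_thousand number → Pre_convert_less_than_thousand number → Spec_convert_less_than_thousand number (convert_less_than_thousand number)

-- ===== LEMMAS AND PROOFS =====

theorem pv_join_one (a : String) : PySem.Str.join " " [a] = a := by
  simp [PySem.Str.join, PySem.Chars.join, List.intercalate]

theorem pv_join_cons (a b : String) (l : List String) :
    PySem.Str.join " " (a :: b :: l) = a ++ " " ++ PySem.Str.join " " (b :: l) := by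
  simp only [PySem.Str.join, List.map_cons, PySem.Chars.join_cons_cons]
  rw [String.ofList_append, String.ofList_append, String.ofList_toList]
  rfl

theorem pv_floordiv_small (n b : Int) (hb : 0 < b) (h0 : 0 ≤ n) (h1 : n < b) :
    PySem.Int.floordiv n b = 0 := by
  rw [PySem.Int.floordiv_eq_iff_of_pos hb]; omega

theorem pv_mod_small (n b : Int) (hb : 0 < b) (h0 : 0 ≤ n) (h1 : n < b) :
    PySem.Int.mod n b = n := by
  have := PySem.Int.floordiv_mul_add_mod n b
  rw [pv_floordiv_small n b hb h0 h1] at this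
  omega

-- the sub-hundred part of B's words list, as a standalone function of r
def pvRestPart (r : Int) : List String :=
  if 10 ≤ r ∧ r < 20 then
    [if r = 10 then "sepuluh" else if r = 11 then "sebelas"
     else (PySem.List.pyGet? pvOnes (r - 10)).getD "" ++ " belas"]
  else
    (if PySem.Int.floordiv r 10 ≠ 0 then [(PySem.List.pyGet? pvOnes (PySem.Int.floordiv r 10)).getD "" ++ " puluh"] else [])
      ++ (if PySem.Int.mod r 10 ≠ 0 then [(PySem.List.pyGet? pvOnes (PySem.Int.mod r 10)).getD ""] else [])

theorem pv_rest_eq (r : Int) (h1 : 1 ≤ r) (h2 : r < 100) :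
    convert_less_than_thousand r = PySem.Str.join " " (pvRestPart r) := by
  rw [convert_less_than_thousand.eq_def]
  unfold pvRestPart
  by_cases hr10 : r < 10
  · rw [if_pos hr10, if_neg (by omega : ¬ (10 ≤ r ∧ r < 20))]
    rw [pv_floordiv_small r 10 (by omega) (by omega) hr10,
        pv_mod_small r 10 (by omega) (by omega) hr10]
    rw [if_neg (by omega : ¬ (0:Int) ≠ 0), if_pos (by omega : r ≠ 0), List.nil_append, pv_join_one]
  · by_cases hr20 : r < 20
    · rw [if_neg hr10, if_pos hr20, if_pos (by omega : 10 ≤ r ∧ r < 20), pv_join_one]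
      interval_cases r <;> decide
    · rw [if_neg hr10, if_neg hr20, if_pos h2, if_neg (by omega : ¬ (10 ≤ r ∧ r < 20))]
      have ht1 : 2 ≤ PySem.Int.floordiv r 10 := by
        rw [PySem.Int.le_floordiv_iff_mul_le (by omega : (0:Int) < 10)]; omega
      have ht2 : PySem.Int.floordiv r 10 < 10 := by
        rw [PySem.Int.floordiv_lt_iff_lt_mul (by omega : (0:Int) < 10)]; omega
      have htens : (PySem.List.pyGet? pvTens (PySem.Int.floordiv r 10)).getD "" =
          (PySem.List.pyGet? pvOnes (PySem.Int.floordiv r 10)).getD "" ++ " puluh" := by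
        interval_cases h : PySem.Int.floordiv r 10 <;> decide
      rw [if_pos (by omega : PySem.Int.floordiv r 10 ≠ 0)]
      by_cases ho : PySem.Int.mod r 10 = 0
      · rw [if_pos ho, if_neg (fun h => h ho), List.append_nil, pv_join_one, htens]
      · rw [if_neg ho, if_pos ho, List.singleton_append, pv_join_cons, pv_join_one, htens]

theorem pv_restPart_ne_nil (r : Int) (h1 : 1 ≤ r) (h2 : r < 100) : pvRestPart r ≠ [] := by
  have hdm := PySem.Int.floordiv_mul_add_mod r 10
  unfold pvRestPart
  split_ifs <;> simp
  omega

-- ===== VERDICT =====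
theorem convert_less_than_thousand_spec : Claim_equal_convert_less_than_thousand := by
  intro n _ hpre
  obtain ⟨hlo, hhi⟩ := hpre
  unfold Spec_convert_less_than_thousand convert_less_than_thousand_alt
  by_cases h10 : n < 10
  · rw [convert_less_than_thousand.eq_def]
    simp only [if_pos h10]
  · simp only [if_neg h10]
    by_cases h100 : n < 100
    · rw [pv_floordiv_small n 100 (by omega) (by omega) h100,
          pv_mod_small n 100 (by omega) (by omega) h100]
      rw [if_neg (by omega : ¬ (0:Int) ≠ 0)]
      rw [pv_rest_eq n (by omega) h100]; unfold pvRestPart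
      by_cases ht : 10 ≤ n ∧ n < 20
      · simp only [if_pos ht, List.nil_append]
      · simp only [if_neg ht, List.nil_append]
    · have hd1 : 1 ≤ PySem.Int.floordiv n 100 := by
        rw [PySem.Int.le_floordiv_iff_mul_le (by omega : (0:Int) < 100)]; omega
      have hd2 : PySem.Int.floordiv n 100 < 10 := by
        rw [PySem.Int.floordiv_lt_iff_lt_mul (by omega : (0:Int) < 100)]; omega
      have hr0 : 0 ≤ PySem.Int.mod n 100 := PySem.Int.mod_nonneg n (by omega)
      have hr1 : PySem.Int.mod n 100 < 100 := PySem.Int.mod_lt n (by omega)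
      have hhun : (if PySem.Int.floordiv n 100 = 1 then "seratus"
           else (PySem.List.pyGet? pvOnes (PySem.Int.floordiv n 100)).getD "" ++ " ratus") =
          (PySem.List.pyGet? pvHundreds (PySem.Int.floordiv n 100)).getD "" := by
        interval_cases h : PySem.Int.floordiv n 100 <;> decide
      rw [convert_less_than_thousand.eq_def]
      rw [if_neg h10, if_neg (by omega : ¬ n < 20), if_neg h100]
      rw [if_pos (by omega : PySem.Int.floordiv n 100 ≠ 0)]
      by_cases hr : PySem.Int.mod n 100 = 0
      · rw [if_pos hr, hr]
        rw [if_neg (by omega : ¬ ((10:Int) ≤ 0 ∧ (0:Int) < 20))]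
        rw [pv_floordiv_small 0 10 (by omega) (by omega) (by omega),
            pv_mod_small 0 10 (by omega) (by omega) (by omega)]
        simp only [ne_eq, not_true_eq_false, if_false, List.append_nil]
        rw [pv_join_one, hhun]
      · rw [if_neg hr]
        have hshape :
            (if 10 ≤ PySem.Int.mod n 100 ∧ PySem.Int.mod n 100 < 20 then
              [if PySem.Int.floordiv n 100 = 1 then "seratus"
               else (PySem.List.pyGet? pvOnes (PySem.Int.floordiv n 100)).getD "" ++ " ratus"] ++
                [if PySem.Int.mod n 100 = 10 then "sepuluh"
                 else if PySem.Int.mod n 100 = 11 then "sebelas"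
                 else (PySem.List.pyGet? pvOnes (PySem.Int.mod n 100 - 10)).getD "" ++ " belas"]
             else
              ([if PySem.Int.floordiv n 100 = 1 then "seratus"
                else (PySem.List.pyGet? pvOnes (PySem.Int.floordiv n 100)).getD "" ++ " ratus"] ++
                 (if PySem.Int.floordiv (PySem.Int.mod n 100) 10 ≠ 0 then
                   [(PySem.List.pyGet? pvOnes (PySem.Int.floordiv (PySem.Int.mod n 100) 10)).getD "" ++ " puluh"] else [])) ++
                (if PySem.Int.mod (PySem.Int.mod n 100) 10 ≠ 0 then
                   [(PySem.List.pyGet? pvOnes (PySem.Int.mod (PySem.Int.mod n 100) 10)).getD ""] else [])) =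
            [if PySem.Int.floordiv n 100 = 1 then "seratus"
             else (PySem.List.pyGet? pvOnes (PySem.Int.floordiv n 100)).getD "" ++ " ratus"] ++
              pvRestPart (PySem.Int.mod n 100) := by
          unfold pvRestPart
          split_ifs <;> simp
        rw [hshape]
        obtain ⟨x, l, hx⟩ : ∃ x l, pvRestPart (PySem.Int.mod n 100) = x :: l := by
          cases hpr : pvRestPart (PySem.Int.mod n 100) with
          | nil => exact absurd hpr (pv_restPart_ne_nil _ (by omega) hr1)
          | cons x l => exact ⟨x, l, rfl⟩
        rw [hx, List.singleton_append, pv_join_cons, hhun,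
            pv_rest_eq _ (by omega) hr1, hx]
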